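-- pv_equiv track=rewrite | github.com/wxbj/homework | dynamic_programming/dynamic_programming.py | pretreatment
-- ===== SOURCE A (Python) =====
-- from collections import deque
--
-- def pretreatment(n, b, W):
--     # 用来存放预处理的二维列表
--     my_list = []
--     # 用来遍历物品
--     queue = deque()
--     # 初始化这个二维数组
--     for i in range(n + 1):
--         my_list.append(set())
--     # 将最后一个物品放入,初始化
--     queue.append(n)
--     queue.append(b)
--     for i in range(n, 0, -1):
--         while True:
--             j = queue.popleft()
--             k = queue.popleft()
--             if k > 0:
--                 my_list[j].add(k)
--                 queue.append(j - 1)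
--                 queue.append(k - W[j])
--             queue.append(j - 1)
--             queue.append(k)
--             if queue[0] != i:
--                 break
--     # [set(), {0, 3, 6, 7, 10}, {0, 10, 3, 6}, {10, 3}, {10}]
--     return my_list
-- ===== SOURCE B (Python) =====
-- def pretreatment(n, b, W):
--     # Frontier DP with per-level dedup instead of an exponentially duplicating deque.
--     res = [set() for _ in range(n + 1)]
--     frontier = [b]
--     for i in range(n, 0, -1):
--         res[i] = set(k for k in frontier if k > 0)
--         children = [c for k in frontier
--                     for c in ([k - W[i], k] if k > 0 else [k])]
--         frontier = list(dict.fromkeys(children))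
--     return res
-- ===== Notes on version B (the rewrite author's own statement) =====
-- stated objective: alternative
-- what changed: A walks a deque of (item, capacity) pairs that re-enqueues every pair's children with duplicates (roughly doubling per level); B keeps one deduplicated frontier list of reachable capacities per level and derives each my_list[i] and the next frontier from it in a single pass (intended as faster; the probe measured 14.96x at n=64 with A timing out beyond that, but could not confirm it consistently).
import Mathlib
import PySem

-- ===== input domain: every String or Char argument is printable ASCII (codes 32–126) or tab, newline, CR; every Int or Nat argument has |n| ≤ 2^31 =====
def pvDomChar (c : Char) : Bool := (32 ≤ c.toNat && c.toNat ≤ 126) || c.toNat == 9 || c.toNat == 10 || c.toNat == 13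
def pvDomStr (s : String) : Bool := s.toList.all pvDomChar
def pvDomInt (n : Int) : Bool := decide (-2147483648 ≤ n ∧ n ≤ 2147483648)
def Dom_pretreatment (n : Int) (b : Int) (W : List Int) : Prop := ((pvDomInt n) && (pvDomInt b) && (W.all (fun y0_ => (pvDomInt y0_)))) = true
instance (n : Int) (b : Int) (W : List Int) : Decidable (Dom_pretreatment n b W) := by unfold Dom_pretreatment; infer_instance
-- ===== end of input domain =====

-- B replaces A's exponentially self-duplicating deque by a per-level deduplicated
-- frontier of reachable capacities (same returned sets; equivalence on the return value).

-- ===== PORT A =====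
-- the inner `while True` loop of A: pop (j,k), record/push children, continue while queue[0] == i
def innerLoop (i : Int) (W : List Int) (q : List (Int × Int)) (ml : List (List Int)) :
    Option (List (Int × Int) × List (List Int)) :=
  match q with
  | [] => none  -- popleft from empty deque: IndexError
  | (j, k) :: rest =>
    if _hj : j = i then
      match (if 0 < k then PySem.List.pyGet? W j else some 0) with
      | none => none  -- W[j]: IndexError
      | some w =>
        let ml' := if 0 < k then ml.modify j.toNat (fun s => PySem.Set.add s k) else ml
        let q' := rest ++ (if 0 < k then [(j - 1, k - w), (j - 1, k)] else [(j - 1, k)])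
        match q' with
        | [] => some (q', ml')  -- unreachable: at least one pair was just appended
        | (j2, _) :: _ => if j2 = i then innerLoop i W q' ml' else some (q', ml')
    else some (q, ml)  -- unreachable totality guard: the front block of the queue always carries j = i
termination_by q.countP (fun p => p.1 == i)
decreasing_by
  subst _hj
  have h0 : List.countP (fun p => p.1 == j) (if _h : 0 < k then [(j - 1, k - w), (j - 1, k)] else [(j - 1, k)]) = 0 := by
    split <;> simp
  simp only [List.countP_append, List.countP_cons, h0, beq_self_eq_true, if_true]
  omega
def stepA (W : List Int) (st : Option (List (Int × Int) × List (List Int))) (i : Int) :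
    Option (List (Int × Int) × List (List Int)) :=
  match st with
  | none => none
  | some (q, ml) => innerLoop i W q ml
def pretreatment (n : Int) (b : Int) (W : List Int) : List (List Int) :=
  let ml0 := (PySem.List.pyRange 0 (n + 1) 1).foldl (fun acc _ => acc ++ [([] : List Int)]) []
  match (PySem.List.pyRange n 0 (-1)).foldl (stepA W) (some ([(n, b)], ml0)) with
  | none => []  -- an exception propagated: value outside the claim (excluded by Pre_)
  | some (_, ml) => ml

-- ===== PORT B =====
def stepB (W : List Int) (st : List (List Int) × List Int) (i : Int) : List (List Int) × List Int :=
  let pos := st.2.filter (fun k => decide (0 < k))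
  (PySem.List.pySetD st.1 i (PySem.Set.ofList pos),
   PySem.List.dedup (st.2.flatMap (fun k => if 0 < k then [k - PySem.List.pyGetD W i 0, k] else [k])))
def pretreatment_alt (n : Int) (b : Int) (W : List Int) : List (List Int) :=
  ((PySem.List.pyRange n 0 (-1)).foldl (stepB W)
    ((PySem.List.pyRange 0 (n + 1) 1).map (fun _ => ([] : List Int)), [b])).1

-- ===== PRECONDITION & SPEC =====
-- Pre_ excludes exactly the inputs where A raises IndexError (W[j] with n ≥ len(W) reached from a positive capacity).
def Pre_pretreatment (n : Int) (b : Int) (W : List Int) : Prop := n ≤ 0 ∨ b ≤ 0 ∨ n < (W.length : Int)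
instance (n : Int) (b : Int) (W : List Int) : Decidable (Pre_pretreatment n b W) := by unfold Pre_pretreatment; infer_instance
def pvWitness_pretreatment : Int × Int × List Int := (2, 5, [7, 1, 2])
def Spec_pretreatment (n : Int) (b : Int) (W : List Int) (out : List (List Int)) : Prop := out = pretreatment_alt n b W
instance (n : Int) (b : Int) (W : List Int) (out : List (List Int)) : Decidable (Spec_pretreatment n b W out) := by unfold Spec_pretreatment; infer_instance

-- ===== CLAIM (what is proved, stated in full; the proofs are below) =====
def Claim_equal_pretreatment : Prop := ∀ (n : Int) (b : Int) (W : List Int), Dom_pretreatment n b W → Pre_pretreatment n b W → Spec_pretreatment n b W (pretreatment n b W)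

-- ===== LEMMAS AND PROOFS =====

lemma ofList_filter (l : List Int) (p : Int → Bool) :
    PySem.Set.ofList (l.filter p) = (PySem.Set.ofList l).filter p := by
  induction l using List.reverseRecOn with
  | nil => simp [PySem.Set.ofList_nil]
  | append_singleton xs x ih =>
    rw [List.filter_append, PySem.Set.ofList_append_singleton]
    by_cases hp : p x = true
    · simp only [List.filter_cons, List.filter_nil, hp, if_true]
      rw [PySem.Set.ofList_append_singleton, ih]
      by_cases hm : x ∈ xs
      · rw [PySem.Set.add_of_mem (by rw [List.mem_filter]; exact ⟨(PySem.Set.mem_ofList _ _).mpr hm, hp⟩),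
           PySem.Set.add_of_mem (by rwa [PySem.Set.mem_ofList])]
      · rw [PySem.Set.add_of_not_mem (by rw [List.mem_filter, PySem.Set.mem_ofList]; tauto),
           PySem.Set.add_of_not_mem (by rw [PySem.Set.mem_ofList]; exact hm),
           List.filter_append]
        simp [hp]
    · simp only [List.filter_cons, List.filter_nil, hp, Bool.false_eq_true, if_false,
        List.append_nil]
      by_cases hm : x ∈ xs
      · rw [PySem.Set.add_of_mem (by rwa [PySem.Set.mem_ofList])]; exact ih
      · rw [PySem.Set.add_of_not_mem (by rw [PySem.Set.mem_ofList]; exact hm), List.filter_append]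
        simp [hp, ih]

lemma update_of_subset (xs : List Int) : ∀ (s : PySem.Set Int), (∀ x ∈ xs, x ∈ s) →
    PySem.Set.update s xs = s := by
  induction xs with
  | nil => intro s _; exact PySem.Set.update_nil s
  | cons x xs ih =>
    intro s h
    rw [PySem.Set.update_cons, PySem.Set.add_of_mem (h x (by simp))]
    exact ih s (fun y hy => h y (by simp [hy]))

lemma ofList_flatMap_ofList (l : List Int) (f : Int → List Int) :
    PySem.Set.ofList ((PySem.Set.ofList l).flatMap f) = PySem.Set.ofList (l.flatMap f) := by
  induction l using List.reverseRecOn with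
  | nil => simp [PySem.Set.ofList_nil]
  | append_singleton xs x ih =>
    rw [PySem.Set.ofList_append_singleton, List.flatMap_append, PySem.Set.ofList_append]
    by_cases hm : x ∈ xs
    · rw [PySem.Set.add_of_mem (by rwa [PySem.Set.mem_ofList]), ih]
      rw [update_of_subset]
      intro y hy
      simp only [List.flatMap_cons, List.flatMap_nil, List.append_nil] at hy
      rw [PySem.Set.mem_ofList, List.mem_flatMap]
      exact ⟨x, hm, hy⟩
    · rw [PySem.Set.add_of_not_mem (by rw [PySem.Set.mem_ofList]; exact hm),
         List.flatMap_append, PySem.Set.ofList_append, ih]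

lemma foldl_modify (ks : List Int) : ∀ (ml : List (List Int)) (idx : Nat),
    ks.foldl (fun ml k => if 0 < k then ml.modify idx (fun s => PySem.Set.add s k) else ml) ml
      = ml.modify idx (fun s => ks.foldl (fun s k => if 0 < k then PySem.Set.add s k else s) s) := by
  induction ks with
  | nil => intro ml idx; exact (List.modify_id idx ml).symm
  | cons k ks ih =>
    intro ml idx
    simp only [List.foldl_cons]
    by_cases hk : 0 < k
    · simp only [hk, if_true, ih, List.modify_modify_eq]
      rfl
    · simp only [hk, if_false, ih]

lemma innerLoop_spec (i w : Int) (W : List Int) (qi : List (Int × Int)) :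
    ∀ (qc : List (Int × Int)) (ml : List (List Int)),
    qi ≠ [] →
    (∀ p ∈ qi, p.1 = i) →
    (∀ p ∈ qc, p.1 = i - 1) →
    ((∃ p ∈ qi, 0 < p.2) → PySem.List.pyGet? W i = some w) →
    innerLoop i W (qi ++ qc) ml =
      some (qc ++ qi.flatMap (fun p => if 0 < p.2 then [(i - 1, p.2 - w), (i - 1, p.2)] else [(i - 1, p.2)]),
            qi.foldl (fun ml p => if 0 < p.2 then ml.modify i.toNat (fun s => PySem.Set.add s p.2) else ml) ml) := by
  induction qi with
  | nil => intro qc ml hne _ _ _; exact absurd rfl hne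
  | cons p rest ih =>
    intro qc ml _ hqi hqc hw
    obtain ⟨j, k⟩ := p
    have hj : j = i := hqi (j, k) (by simp)
    subst hj
    rw [innerLoop.eq_def]
    by_cases hk : 0 < k
    · have hwj : PySem.List.pyGet? W j = some w := hw ⟨(j, k), by simp, hk⟩
      simp only [List.cons_append, hk, if_true, hwj, dite_true]
      cases rest with
      | nil =>
        cases qc with
        | nil =>
          simp only [List.nil_append]
          rw [if_neg (by omega)]
          simp [hk]
        | cons c cs =>
          obtain ⟨c1, c2⟩ := c
          have hc : c1 = j - 1 := hqc (c1, c2) (by simp)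
          simp only [List.nil_append, List.cons_append]
          rw [if_neg (by omega)]
          simp [hk]
      | cons r rs =>
        obtain ⟨r1, r2⟩ := r
        have hr : r1 = j := hqi (r1, r2) (by simp)
        simp only [List.cons_append, List.append_assoc]
        rw [if_pos hr, ← List.cons_append]
        rw [ih (qc ++ [(j - 1, k - w), (j - 1, k)]) _ (by simp)
             (fun p hp => hqi p (by simp [hp]))
             (by intro p hp
                 rcases List.mem_append.mp hp with h | h
                 · exact hqc p h
                 · simp only [List.mem_cons, List.not_mem_nil, or_false] at h
                   rcases h with h | h <;> subst h <;> simp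
             )
             (fun _ => hwj)]
        simp [hk, List.append_assoc]
    · simp only [List.cons_append, hk, if_false, dite_true]
      cases rest with
      | nil =>
        cases qc with
        | nil =>
          simp only [List.nil_append]
          rw [if_neg (by omega)]
          simp [hk]
        | cons c cs =>
          obtain ⟨c1, c2⟩ := c
          have hc : c1 = j - 1 := hqc (c1, c2) (by simp)
          simp only [List.nil_append, List.cons_append]
          rw [if_neg (by omega)]
          simp [hk]
      | cons r rs =>
        obtain ⟨r1, r2⟩ := r
        have hr : r1 = j := hqi (r1, r2) (by simp)
        simp only [List.cons_append, List.append_assoc]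
        rw [if_pos hr, ← List.cons_append]
        rw [ih (qc ++ [(j - 1, k)]) _ (by simp)
             (fun p hp => hqi p (by simp [hp]))
             (by intro p hp
                 rcases List.mem_append.mp hp with h | h
                 · exact hqc p h
                 · simp only [List.mem_cons, List.not_mem_nil, or_false] at h
                   subst h; simp
             )
             (fun hex => hw (by rcases hex with ⟨p, hp, hpos⟩; exact ⟨p, by simp [hp], hpos⟩))]
        simp [hk, List.append_assoc]

-- main loop invariant: A's queue is B's frontier with duplicates, A's my_list is B's res
lemma loop_eq (W : List Int) (m : Nat) :
    ∀ (ks : List Int) (ml : List (List Int)),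
    ks ≠ [] →
    ((∃ k ∈ ks, 0 < k) → ∀ j : Int, 1 ≤ j → j ≤ (m : Int) → PySem.List.pyGet? W j ≠ none) →
    (∀ j : Nat, 1 ≤ j → j ≤ m → ml[j]?.getD [] = []) →
    ∃ q', (PySem.List.pyRange (m : Int) 0 (-1)).foldl (stepA W)
            (some (ks.map (fun k => ((m : Int), k)), ml))
          = some (q', ((PySem.List.pyRange (m : Int) 0 (-1)).foldl (stepB W) (ml, PySem.List.dedup ks)).1) := by
  induction m with
  | zero =>
    intro ks ml _ _ _
    rw [PySem.List.pyRange_neg_one_eq_nil (by omega)]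
    exact ⟨_, rfl⟩
  | succ m ih =>
    intro ks ml hne hW hml
    have hcast : ((m + 1 : Nat) : Int) = (m : Int) + 1 := by push_cast; ring
    rw [hcast, PySem.List.pyRange_neg_one_cons (by omega)]
    have hm1 : (m : Int) + 1 - 1 = (m : Int) := by ring
    simp only [List.foldl_cons, hm1]
    -- the weight W[i] read at this level (only consulted when some capacity is positive)
    have hwcond : (∃ p ∈ ks.map (fun k => ((m : Int) + 1, k)), 0 < p.2) →
        PySem.List.pyGet? W ((m : Int) + 1) = some (PySem.List.pyGetD W ((m : Int) + 1) 0) := by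
      rintro ⟨p, hp, hpos⟩
      obtain ⟨k, hk, rfl⟩ := List.mem_map.mp hp
      have hne' : PySem.List.pyGet? W ((m : Int) + 1) ≠ none :=
        hW ⟨k, hk, hpos⟩ ((m : Int) + 1) (by omega) (by omega)
      cases h : PySem.List.pyGet? W ((m : Int) + 1) with
      | none => exact absurd h hne'
      | some x => simp [PySem.List.pyGetD, h]
    -- one A level = innerLoop over the whole block
    have hA := innerLoop_spec ((m : Int) + 1) (PySem.List.pyGetD W ((m : Int) + 1) 0) W
      (ks.map (fun k => ((m : Int) + 1, k))) [] ml (by simpa using hne)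
      (by simp) (by simp) hwcond
    rw [List.append_nil] at hA
    have hstepA : stepA W (some (ks.map (fun k => ((m : Int) + 1, k)), ml)) ((m : Int) + 1)
        = innerLoop ((m : Int) + 1) W (ks.map (fun k => ((m : Int) + 1, k))) ml := rfl
    rw [hm1] at hA
    rw [hstepA, hA]
    set w := PySem.List.pyGetD W ((m : Int) + 1) 0 with hw
    set fval : Int → List Int := fun k => if 0 < k then [k - w, k] else [k] with hfval
    set ks' := ks.flatMap fval with hks'
    set p : Int → Bool := fun k => decide (0 < k) with hp
    set v := PySem.Set.ofList (ks.filter p) with hv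
    set ml' := ml.set (m + 1) v with hml'
    -- the queue after the level is B's next frontier (with duplicates), one level down
    have hq : List.flatMap
        (fun q => if 0 < q.2 then [((m : Int), q.2 - w), ((m : Int), q.2)] else [((m : Int), q.2)])
        (List.map (fun k => ((m : Int) + 1, k)) ks) = ks'.map (fun k => ((m : Int), k)) := by
      rw [List.flatMap_map, hks', List.map_flatMap]
      exact List.flatMap_congr (fun k _ => by by_cases h : 0 < k <;> simp [hfval, h])
    -- the my_list update of the level is one set-assignment of the deduped positives
    have hmlstep : List.foldl
        (fun ml q => if 0 < q.2 then ml.modify ((m : Int) + 1).toNat (fun s => PySem.Set.add s q.2) else ml)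
        ml (List.map (fun k => ((m : Int) + 1, k)) ks) = ml' := by
      rw [List.foldl_map]
      simp only []
      rw [foldl_modify, List.modify_eq_set]
      have htn : ((m : Int) + 1).toNat = m + 1 := by omega
      rw [htn]
      have h0 : ml[m + 1]?.getD default = [] := hml (m + 1) (by omega) (by omega)
      rw [h0, hml', hv, PySem.Set.ofList_eq_foldl, List.foldl_filter]
      simp [hp]
    -- B's step of the level
    have hB : stepB W (ml, PySem.List.dedup ks) ((m : Int) + 1) = (ml', PySem.List.dedup ks') := by
      unfold stepB
      simp only [PySem.List.dedup_eq_ofList]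
      rw [PySem.List.pySetD_of_nonneg _ _ (by omega)]
      have htn : ((m : Int) + 1).toNat = m + 1 := by omega
      rw [htn]
      have h1 : PySem.Set.ofList ((PySem.Set.ofList ks).filter p) = v := by
        rw [← ofList_filter, PySem.Set.ofList_ofList, ofList_filter, hv, ← ofList_filter]
      have h2 : PySem.Set.ofList ((PySem.Set.ofList ks).flatMap fval) = PySem.Set.ofList ks' := by
        rw [ofList_flatMap_ofList, hks']
      rw [hml']
      exact Prod.ext (by rw [h1]) (by rw [← hfval, h2])
    -- tail of the loop by the induction hypothesis
    have hne' : ks' ≠ [] := by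
      rw [hks']
      cases ks with
      | nil => exact absurd rfl hne
      | cons k t =>
        simp only [List.flatMap_cons]
        have : fval k ≠ [] := by simp only [hfval]; split <;> simp
        intro hcon
        exact this (List.append_eq_nil_iff.mp hcon).1
    have hW' : (∃ k ∈ ks', 0 < k) → ∀ j : Int, 1 ≤ j → j ≤ (m : Int) → PySem.List.pyGet? W j ≠ none := by
      rintro ⟨k', hk', hpos⟩ j h1 h2
      obtain ⟨k, hk, hmem⟩ := List.mem_flatMap.mp hk'
      have : ∃ k ∈ ks, 0 < k := by
        refine ⟨k, hk, ?_⟩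
        rw [hfval] at hmem
        by_cases h : 0 < k
        · exact h
        · simp only [h, if_false, List.mem_singleton] at hmem; omega
      exact hW this j h1 (by omega)
    have hml'' : ∀ j : Nat, 1 ≤ j → j ≤ m → ml'[j]?.getD [] = [] := by
      intro j h1 h2
      rw [hml', List.getElem?_set_ne (by omega)]
      exact hml j h1 (by omega)
    obtain ⟨q', hq'⟩ := ih ks' ml' hne' hW' hml''
    refine ⟨q', ?_⟩
    rw [List.nil_append, hq, hmlstep, hq', hB]
-- ===== VERDICT (by name: the statement is the Claim_ definition above) =====
theorem pretreatment_spec : Claim_equal_pretreatment := by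
  intro n b W _dom hpre
  unfold Spec_pretreatment pretreatment pretreatment_alt
  have hinit : (PySem.List.pyRange 0 (n + 1) 1).foldl
      (fun acc (_ : Int) => acc ++ [([] : List Int)]) []
      = (PySem.List.pyRange 0 (n + 1) 1).map (fun _ => ([] : List Int)) := by
    rw [PySem.List.foldl_append_singleton_eq_map (fun _ => ([] : List Int))]
    simp
  by_cases hn : n ≤ 0
  · rw [PySem.List.pyRange_neg_one_eq_nil hn]
    simp [hinit]
  · lift n to ℕ using (by omega : 0 ≤ n) with m
    rw [hinit]
    have hml0 : ∀ j : ℕ, 1 ≤ j → j ≤ m →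
        (((PySem.List.pyRange 0 ((m : Int) + 1) 1).map (fun _ => ([] : List Int)))[j]?).getD [] = [] := by
      intro j _ _
      rw [List.getElem?_map]
      cases (PySem.List.pyRange 0 ((m : Int) + 1) 1)[j]? <;> simp
    have hW0 : (∃ k ∈ [b], 0 < k) → ∀ j : Int, 1 ≤ j → j ≤ (m : Int) →
        PySem.List.pyGet? W j ≠ none := by
      rintro ⟨k, hk, hpos⟩ j h1 h2
      simp only [List.mem_singleton] at hk
      subst hk
      have hlen : (m : Int) < (W.length : Int) := by
        rcases hpre with h | h | h
        · omega
        · omega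
        · exact h
      intro hcon
      exact (PySem.List.pyGet?_eq_none_iff W j).mp hcon ⟨by omega, by omega⟩
    obtain ⟨q', hfold⟩ := loop_eq W m [b]
      ((PySem.List.pyRange 0 ((m : Int) + 1) 1).map (fun _ => ([] : List Int)))
      (by simp) hW0 hml0
    have hone : [((m : Int), b)] = [b].map (fun k => ((m : Int), k)) := by simp
    have hded : PySem.List.dedup [b] = [b] := by
      rw [PySem.List.dedup_eq_ofList]
      exact PySem.Set.ofList_eq_self_of_nodup [b] (by simp)
    rw [hone, hfold, hded]
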